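-- pv_equiv track=rewrite | github.com/catchingSun/MouseTrackRecognition | MouseTrackRecognition-Python/Codes/DataProcess/construct_the_eigenvector.py | __calculate_inflection_points_num
-- ===== SOURCE A (Python) =====
-- def __calculate_inflection_points_num(every_track):
--     iftp_num = 0
--     for i in range(len(every_track) - 2):
--         j = i + 1
--         k = i + 2
--         if (every_track[j][2] != every_track[i][2]) or (every_track[j][2] != every_track[k][2]):
--             iftp_num += 1
--     return iftp_num
-- ===== SOURCE B (Python) =====
-- def __calculate_inflection_points_num(every_track):
--     # Run-based: split third coordinates into maximal runs of equal values;
--     # a window of 3 is "flat" iff it lies inside one run, and every other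
--     # window is an inflection window.
--     n = len(every_track)
--     total_flat = 0
--     run_len = 0
--     prev = None
--     for pt in every_track:
--         if run_len > 0 and not (pt[2] != prev):
--             run_len += 1
--         else:
--             total_flat += max(0, run_len - 2)
--             run_len = 1
--         prev = pt[2]
--     total_flat += max(0, run_len - 2)
--     return max(0, n - 2) - total_flat
-- ===== Notes on version B (the rewrite author's own statement) =====
-- stated objective: alternative
-- what changed: Replaces the per-window triple comparison over indices by a single run-length pass: it accumulates maximal runs of equal third coordinates, counts the flat windows each run contains (max(0,L-2)), and returns max(0,n-2) minus that total.
import Mathlib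
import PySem

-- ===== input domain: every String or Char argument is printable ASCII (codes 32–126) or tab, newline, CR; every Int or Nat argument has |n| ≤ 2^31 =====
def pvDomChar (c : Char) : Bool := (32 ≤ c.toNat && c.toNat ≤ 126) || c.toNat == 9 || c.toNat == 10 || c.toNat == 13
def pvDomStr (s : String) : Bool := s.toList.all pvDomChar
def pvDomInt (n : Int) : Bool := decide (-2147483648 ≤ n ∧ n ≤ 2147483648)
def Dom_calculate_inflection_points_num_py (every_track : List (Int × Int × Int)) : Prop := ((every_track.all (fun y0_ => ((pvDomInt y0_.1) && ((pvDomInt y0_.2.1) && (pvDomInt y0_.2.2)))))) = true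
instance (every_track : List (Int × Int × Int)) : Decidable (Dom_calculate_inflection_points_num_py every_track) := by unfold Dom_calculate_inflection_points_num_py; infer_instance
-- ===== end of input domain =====

-- B replaces the per-window index loop by a single run-length pass over the third
-- coordinates (objective: alternative decomposition, same O(n) cost).

-- ===== PORT A =====
-- Literal port of A's indexed loop.  For every i produced by range(len-2) the
-- indices i, i+1, i+2 are in range, so the default of pyGetD is never used and
-- pyGetD is exact Python indexing here.
def calculate_inflection_points_num_py (every_track : List (Int × Int × Int)) : Int :=
  (PySem.List.pyRange 0 ((every_track.length : Int) - 2) 1).foldl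
    (fun iftp_num i =>
      let j := i + 1
      let k := i + 2
      if ((PySem.List.pyGetD every_track j (0, 0, 0)).2.2 ≠ (PySem.List.pyGetD every_track i (0, 0, 0)).2.2) ∨
         ((PySem.List.pyGetD every_track j (0, 0, 0)).2.2 ≠ (PySem.List.pyGetD every_track k (0, 0, 0)).2.2)
      then iftp_num + 1 else iftp_num) 0

-- ===== PORT B =====
-- State of B's single pass: (total_flat, run_len, prev third coordinate).
def pvRunStep (st : Int × Int × Option Int) (pt : Int × Int × Int) : Int × Int × Option Int :=
  if st.2.1 > 0 ∧ ¬ (some pt.2.2 ≠ st.2.2) then (st.1, st.2.1 + 1, some pt.2.2)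
  else (st.1 + max 0 (st.2.1 - 2), 1, some pt.2.2)

def calculate_inflection_points_num_py_alt (every_track : List (Int × Int × Int)) : Int :=
  let n : Int := every_track.length
  let st := every_track.foldl pvRunStep (0, 0, none)
  max 0 (n - 2) - (st.1 + max 0 (st.2.1 - 2))

-- ===== PRECONDITION & SPEC =====
def Spec_calculate_inflection_points_num_py (every_track : List (Int × Int × Int)) (out : Int) : Prop := out = calculate_inflection_points_num_py_alt every_track
instance (every_track : List (Int × Int × Int)) (out : Int) : Decidable (Spec_calculate_inflection_points_num_py every_track out) := by unfold Spec_calculate_inflection_points_num_py; infer_instance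

-- ===== CLAIM (what is proved, stated in full; the proofs are below) =====
def Claim_equal_calculate_inflection_points_num_py : Prop := ∀ (every_track : List (Int × Int × Int)), Dom_calculate_inflection_points_num_py every_track → Spec_calculate_inflection_points_num_py every_track (calculate_inflection_points_num_py every_track)

-- ===== LEMMAS AND PROOFS =====

-- number of non-flat (inflection) windows of 3, structurally
def pvTri : List Int → Int
  | a :: b :: c :: t => (if b ≠ a ∨ b ≠ c then 1 else 0) + pvTri (b :: c :: t)
  | _ => 0

def pvFlat : List Int → Int
  | a :: b :: c :: t => (if a = b ∧ b = c then 1 else 0) + pvFlat (b :: c :: t)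
  | _ => 0
theorem pvTri_add_pvFlat (s : List Int) : pvTri s + pvFlat s = max 0 ((s.length : Int) - 2) := by
  induction s with
  | nil => simp [pvTri, pvFlat]
  | cons a t ih =>
    match t with
    | [] => simp [pvTri, pvFlat]
    | [b] => simp [pvTri, pvFlat]
    | b :: c :: t3 =>
      simp only [pvTri, pvFlat, List.length_cons] at *
      push_cast at *
      split_ifs with h1 h2 <;> try tauto
      · omega
      · omega
def pvInd (xs : List (Int × Int × Int)) (k : Nat) : Int :=
  if ((xs.getD (k+1) (0,0,0)).2.2 ≠ (xs.getD k (0,0,0)).2.2) ∨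
     ((xs.getD (k+1) (0,0,0)).2.2 ≠ (xs.getD (k+2) (0,0,0)).2.2)
  then 1 else 0
theorem pvA_sum : ∀ (xs : List (Int × Int × Int)),
    ((List.range (xs.length - 2)).map (pvInd xs)).sum = pvTri (xs.map (fun p => p.2.2)) := by
  intro xs
  induction xs with
  | nil => simp [pvTri]
  | cons a t ih =>
    match t with
    | [] => simp [pvTri]
    | [b] => simp [pvTri]
    | b :: c :: t3 =>
      have hlen : (a :: b :: c :: t3).length - 2 = (t3.length) + 1 := by simp
      rw [hlen, List.range_succ_eq_map]
      simp only [List.map_cons, List.map_map, List.sum_cons]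
      have hshift : (pvInd (a :: b :: c :: t3)) ∘ Nat.succ = pvInd (b :: c :: t3) := by
        funext k
        simp [pvInd, Function.comp]
      rw [hshift]
      have hlen2 : (b :: c :: t3).length - 2 = t3.length := by simp
      rw [hlen2] at ih
      rw [ih]
      have h0 : pvInd (a :: b :: c :: t3) 0 = (if (b.2.2 ≠ a.2.2 ∨ b.2.2 ≠ c.2.2) then (1:Int) else 0) := by
        simp [pvInd]
      rw [h0]
      simp [pvTri]
theorem pvA_eq_pvTri (xs : List (Int × Int × Int)) :
    calculate_inflection_points_num_py xs = pvTri (xs.map (fun p => p.2.2)) := by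
  unfold calculate_inflection_points_num_py
  have hfun : (fun (iftp_num : Int) (i : Int) =>
      let j := i + 1
      let k := i + 2
      if ((PySem.List.pyGetD xs j (0, 0, 0)).2.2 ≠ (PySem.List.pyGetD xs i (0, 0, 0)).2.2) ∨
         ((PySem.List.pyGetD xs j (0, 0, 0)).2.2 ≠ (PySem.List.pyGetD xs k (0, 0, 0)).2.2)
      then iftp_num + 1 else iftp_num)
      = (fun (acc : Int) (i : Int) => acc +
          (if ((PySem.List.pyGetD xs (i+1) (0, 0, 0)).2.2 ≠ (PySem.List.pyGetD xs i (0, 0, 0)).2.2) ∨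
              ((PySem.List.pyGetD xs (i+1) (0, 0, 0)).2.2 ≠ (PySem.List.pyGetD xs (i+2) (0, 0, 0)).2.2)
           then 1 else 0)) := by
    funext acc i
    dsimp only
    split_ifs <;> first | rfl | omega
  rw [hfun, PySem.List.foldl_add]
  rw [PySem.List.pyRange_one]
  simp only [List.map_map]
  have hnat : (((xs.length : Int) - 2 - 0)).toNat = xs.length - 2 := by omega
  rw [hnat]
  have hfn : ∀ (k : Nat),
      (if ((PySem.List.pyGetD xs ((0 + (k:Int))+1) (0, 0, 0)).2.2 ≠ (PySem.List.pyGetD xs (0 + (k:Int)) (0, 0, 0)).2.2) ∨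
          ((PySem.List.pyGetD xs ((0 + (k:Int))+1) (0, 0, 0)).2.2 ≠ (PySem.List.pyGetD xs ((0 + (k:Int))+2) (0, 0, 0)).2.2)
       then (1:Int) else 0) = pvInd xs k := by
    intro k
    have e1 : (0 + (k:Int)) + 1 = ((k+1 : Nat) : Int) := by push_cast; ring
    have e2 : (0 + (k:Int)) + 2 = ((k+2 : Nat) : Int) := by push_cast; ring
    have e0 : (0 + (k:Int)) = ((k : Nat) : Int) := by ring
    rw [e1, e2, e0]
    simp only [PySem.List.pyGetD_natCast]
    simp only [pvInd, List.getD_eq_getElem?_getD]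
  simp only [Function.comp_def]
  rw [List.map_congr_left (fun k _ => hfn k), pvA_sum]
  ring
theorem pvFlat_replicate (v : Int) : ∀ (k : Nat), pvFlat (List.replicate k v) = max 0 ((k : Int) - 2)
  | 0 => by simp [pvFlat]
  | 1 => by simp [pvFlat, List.replicate]
  | 2 => by simp [pvFlat, List.replicate]
  | (k+3) => by
    have ih := pvFlat_replicate v (k+2)
    simp only [List.replicate_succ, pvFlat] at ih ⊢
    push_cast
    simp at ih ⊢
    omega
theorem pvFlat_break (v x : Int) (t : List Int) (hx : x ≠ v) :
    ∀ (k : Nat), pvFlat (List.replicate k v ++ x :: t) = max 0 ((k : Int) - 2) + pvFlat (x :: t)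
  | 0 => by simp
  | 1 => by
    match t with
    | [] => simp [pvFlat]
    | c :: t' => simp [pvFlat, Ne.symm hx]
  | 2 => by
    match t with
    | [] => simp [pvFlat, Ne.symm hx]
    | c :: t' => simp [pvFlat, Ne.symm hx]
  | (k+3) => by
    have ih := pvFlat_break v x t hx (k+2)
    simp only [List.replicate_succ, List.cons_append, pvFlat] at ih ⊢
    push_cast at ih ⊢
    simp at ih ⊢
    omega
theorem pvRun_invariant (t : List (Int × Int × Int)) :
    ∀ (v tf : Int) (k : Nat), 1 ≤ k →
      (let st := t.foldl pvRunStep (tf, (k : Int), some v)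
       st.1 + max 0 (st.2.1 - 2)) =
      tf + pvFlat (List.replicate k v ++ t.map (fun p => p.2.2)) := by
  induction t with
  | nil => intro v tf k hk; simp [pvFlat_replicate]
  | cons p t ih =>
    intro v tf k hk
    simp only [List.foldl_cons, List.map_cons]
    by_cases hpv : p.2.2 = v
    · have hstep : pvRunStep (tf, (k : Int), some v) p = (tf, ((k+1 : Nat) : Int), some v) := by
        simp only [pvRunStep]
        rw [if_pos ⟨by simp; omega, by simp [hpv]⟩]
        simp [hpv]
      rw [hstep]
      have := ih v tf (k+1) (by omega)
      simp only at this ⊢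
      rw [this]
      have : List.replicate (k+1) v ++ t.map (fun p => p.2.2)
           = List.replicate k v ++ v :: t.map (fun p => p.2.2) := by
        simp [List.replicate_succ']
      rw [this, hpv]
    · have hstep : pvRunStep (tf, (k : Int), some v) p
           = (tf + max 0 ((k : Int) - 2), ((1 : Nat) : Int), some p.2.2) := by
        simp [pvRunStep, hpv]
      rw [hstep]
      have := ih p.2.2 (tf + max 0 ((k : Int) - 2)) 1 (by omega)
      simp only at this ⊢
      rw [this]
      rw [pvFlat_break v p.2.2 (t.map (fun p => p.2.2)) hpv k]
      simp
      ring
theorem pvB_eq (xs : List (Int × Int × Int)) :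
    calculate_inflection_points_num_py_alt xs
      = max 0 ((xs.length : Int) - 2) - pvFlat (xs.map (fun p => p.2.2)) := by
  match xs with
  | [] => simp [calculate_inflection_points_num_py_alt, pvFlat]
  | p :: t =>
    unfold calculate_inflection_points_num_py_alt
    simp only [List.foldl_cons]
    have hstep : pvRunStep (0, 0, none) p = (0, ((1 : Nat) : Int), some p.2.2) := by
      simp [pvRunStep]
    rw [hstep]
    have h := pvRun_invariant t p.2.2 0 1 (by omega)
    simp only at h ⊢
    rw [h]
    simp [List.replicate_one]

-- ===== VERDICT (by name: the statement is the Claim_ definition above) =====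
theorem calculate_inflection_points_num_py_spec : Claim_equal_calculate_inflection_points_num_py := by
  intro xs _
  unfold Spec_calculate_inflection_points_num_py
  have h := pvTri_add_pvFlat (xs.map (fun p => p.2.2))
  simp only [List.length_map] at h
  rw [pvA_eq_pvTri, pvB_eq]
  omega
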